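-- pv_equiv track=rewrite | github.com/mgeromel/relex | lit_loadr.py | find_tokens
-- ===== SOURCE A (Python) =====
-- def find_tokens(l_bound, r_bound, offset_mapping):
-- 	l_index = len(offset_mapping) - 2
-- 	r_index = 0
--
-- 	# FIND L_BOUND
-- 	for index, offset in enumerate(offset_mapping):
-- 		if l_bound < offset[0]:
-- 			l_index = index - 1
-- 			break
--
-- 	# FIND R_INDEX
-- 	for index, offset in reversed(list(enumerate(offset_mapping[:-1]))):
-- 		if r_bound >= offset[1]:
-- 			r_index = index
-- 			break
--
-- 	return l_index, r_index
-- ===== SOURCE B (Python) =====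
-- def find_tokens(l_bound, r_bound, offset_mapping):
-- 	# One forward pass with two accumulators instead of A's two directional
-- 	# scans with breaks: l_index records the first index whose start exceeds
-- 	# l_bound (minus one), r_index keeps the last index before the final token
-- 	# whose end is covered by r_bound.
-- 	n = len(offset_mapping)
-- 	l_index = n - 2
-- 	r_index = 0
-- 	found_l = False
-- 	for i, off in enumerate(offset_mapping):
-- 		if not found_l and l_bound < off[0]:
-- 			l_index = i - 1
-- 			found_l = True
-- 		if i < n - 1 and r_bound >= off[1]:
-- 			r_index = i
-- 	return l_index, r_index
-- ===== Notes on version B (the rewrite author's own statement) =====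
-- stated objective: alternative
-- what changed: A's two directional scans (a forward scan with break and a reversed scan with break over offset_mapping[:-1]) are replaced by one forward pass that tracks both answers with accumulators (first-match flag for l_index, last-match overwrite for r_index).
-- outside the precondition, e.g. on find_tokens(6, 100, [(5,), (7, 8), (9, 10)]): A returns (0, 1), B raises IndexError
import Mathlib
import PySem

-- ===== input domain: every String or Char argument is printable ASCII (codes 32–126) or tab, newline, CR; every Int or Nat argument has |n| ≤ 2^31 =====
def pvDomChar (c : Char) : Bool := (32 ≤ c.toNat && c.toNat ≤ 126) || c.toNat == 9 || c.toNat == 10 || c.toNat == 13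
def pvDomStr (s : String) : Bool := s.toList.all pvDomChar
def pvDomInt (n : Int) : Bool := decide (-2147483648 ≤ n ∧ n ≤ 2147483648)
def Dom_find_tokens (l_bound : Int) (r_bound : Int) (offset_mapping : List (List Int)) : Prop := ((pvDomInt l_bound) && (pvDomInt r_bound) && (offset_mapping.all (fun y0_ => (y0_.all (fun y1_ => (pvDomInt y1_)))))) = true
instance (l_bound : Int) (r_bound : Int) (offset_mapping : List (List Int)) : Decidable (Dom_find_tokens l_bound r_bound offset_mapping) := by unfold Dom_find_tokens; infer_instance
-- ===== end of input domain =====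

-- B replaces A's two directional break-scans by one forward pass with two accumulators (alternative decomposition, same cost).


-- ===== PORT A =====
-- offset[0] / offset[1]; Python raises IndexError where pyGet? is none — those inputs are outside Pre_.
def ftGet0 (off : List Int) : Int := (PySem.List.pyGet? off 0).getD 0
def ftGet1 (off : List Int) : Int := (PySem.List.pyGet? off 1).getD 0

-- A's first for-loop with break: first index i with l_bound < offset[0], returning i - 1.
def ftFindL (l_bound : Int) : List (Int × List Int) → Option Int
  | [] => none
  | (i, off) :: rest => if l_bound < ftGet0 off then some (i - 1) else ftFindL l_bound rest

-- A's second for-loop with break (over the reversed enumerate): first index with r_bound >= offset[1].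
def ftFindR (r_bound : Int) : List (Int × List Int) → Option Int
  | [] => none
  | (i, off) :: rest => if r_bound ≥ ftGet1 off then some i else ftFindR r_bound rest

def find_tokens (l_bound : Int) (r_bound : Int) (offset_mapping : List (List Int)) : List Int :=
  let l_index := (ftFindL l_bound (PySem.List.enumerate offset_mapping 0)).getD ((offset_mapping.length : Int) - 2)
  let r_index := (ftFindR r_bound ((PySem.List.enumerate (PySem.List.slice offset_mapping none (some (-1))) 0).reverse)).getD 0
  [l_index, r_index]

-- ===== PORT B =====
-- B's single loop body: state (l_index, r_index, found_l).
def ftStep (l_bound r_bound n : Int) (st : Int × Int × Bool) (p : Int × List Int) : Int × Int × Bool :=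
  let li := if !st.2.2 && decide (l_bound < ftGet0 p.2) then p.1 - 1 else st.1
  let fd := st.2.2 || decide (l_bound < ftGet0 p.2)
  let ri := if decide (p.1 < n - 1) && decide (r_bound ≥ ftGet1 p.2) then p.1 else st.2.1
  (li, ri, fd)

def find_tokens_alt (l_bound : Int) (r_bound : Int) (offset_mapping : List (List Int)) : List Int :=
  let n : Int := offset_mapping.length
  let st := (PySem.List.enumerate offset_mapping 0).foldl (ftStep l_bound r_bound n) (n - 2, 0, false)
  [st.1, st.2.1]

-- ===== PRECONDITION & SPEC =====
-- Pre_ excludes exactly the inputs on which one of the two programs raises IndexError reading a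
-- short offset entry: A reads offset[0]/offset[1] up to its breaks, B's single pass reads
-- offset[0] of every entry and offset[1] of every entry but the last; where A still returns
-- (breaking before a short entry) B raises, so those inputs stay outside Pre_.
def Pre_find_tokens (l_bound : Int) (r_bound : Int) (offset_mapping : List (List Int)) : Prop :=
  (∀ off ∈ offset_mapping.dropLast, 2 ≤ off.length) ∧ ∀ off ∈ offset_mapping, 1 ≤ off.length
instance (l_bound : Int) (r_bound : Int) (offset_mapping : List (List Int)) : Decidable (Pre_find_tokens l_bound r_bound offset_mapping) := by unfold Pre_find_tokens; infer_instance
def pvWitness_find_tokens : Int × Int × List (List Int) := (2, 7, [[0, 3], [3, 6], [6, 9]])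

def Spec_find_tokens (l_bound : Int) (r_bound : Int) (offset_mapping : List (List Int)) (out : List Int) : Prop := out = find_tokens_alt l_bound r_bound offset_mapping
instance (l_bound : Int) (r_bound : Int) (offset_mapping : List (List Int)) (out : List Int) : Decidable (Spec_find_tokens l_bound r_bound offset_mapping out) := by unfold Spec_find_tokens; infer_instance

-- ===== CLAIM (what is proved, stated in full; the proofs are below) =====
def Claim_equal_find_tokens : Prop := ∀ (l_bound : Int) (r_bound : Int) (offset_mapping : List (List Int)), Dom_find_tokens l_bound r_bound offset_mapping → Pre_find_tokens l_bound r_bound offset_mapping → Spec_find_tokens l_bound r_bound offset_mapping (find_tokens l_bound r_bound offset_mapping)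

-- ===== LEMMAS AND PROOFS =====

-- ftFindR with B's index guard built in.
def ftFindRg (r_bound n : Int) : List (Int × List Int) → Option Int
  | [] => none
  | (i, off) :: rest => if i < n - 1 ∧ r_bound ≥ ftGet1 off then some i else ftFindRg r_bound n rest

-- The first component of B's fold is A's first break-scan (or the untouched init once found).
theorem ftFold_fst (l r n : Int) : ∀ (xs : List (Int × List Int)) (li ri : Int) (fd : Bool),
    (xs.foldl (ftStep l r n) (li, ri, fd)).1
      = if fd then li else (ftFindL l xs).getD li := by
  intro xs
  induction xs with
  | nil => intro li ri fd; cases fd <;> simp [ftFindL]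
  | cons p rest ih =>
    intro li ri fd
    obtain ⟨i, off⟩ := p
    cases fd with
    | true => simp [ftStep, ih]
    | false =>
      by_cases h : l < ftGet0 off <;>
        simp [ftStep, h, ih, ftFindL]

-- The middle component of B's fold is the guarded break-scan over the reversed list.
theorem ftFold_snd (l r n : Int) : ∀ (xs : List (Int × List Int)) (li ri : Int) (fd : Bool),
    (xs.foldl (ftStep l r n) (li, ri, fd)).2.1
      = (ftFindRg r n xs.reverse).getD ri := by
  intro xs
  induction xs using List.reverseRecOn with
  | nil => intro li ri fd; simp [ftFindRg]
  | append_singleton ys p ih =>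
    intro li ri fd
    obtain ⟨i, off⟩ := p
    rw [List.foldl_append]
    by_cases h : i < n - 1 ∧ r ≥ ftGet1 off
    · simp [ftStep, h.1, h.2, ftFindRg]
    · have hstep : (ftStep l r n (ys.foldl (ftStep l r n) (li, ri, fd)) (i, off)).2.1
          = (ys.foldl (ftStep l r n) (li, ri, fd)).2.1 := by
        simp only [ftStep]
        rcases Decidable.not_and_iff_not_or_not.mp h with h' | h' <;> simp [h']
      simp only [List.foldl_cons, List.foldl_nil, hstep, ih, List.reverse_append,
        List.reverse_singleton, List.singleton_append, ftFindRg, if_neg h]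

-- The guard is vacuous on lists whose indices all lie below n - 1.
theorem ftFindRg_eq_ftFindR (r n : Int) : ∀ (xs : List (Int × List Int)),
    (∀ p ∈ xs, p.1 < n - 1) → ftFindRg r n xs = ftFindR r xs := by
  intro xs
  induction xs with
  | nil => intro _; rfl
  | cons p rest ih =>
    intro h
    obtain ⟨i, off⟩ := p
    have hi : i < n - 1 := h (i, off) (List.mem_cons_self)
    by_cases hc : r ≥ ftGet1 off
    · simp [ftFindRg, ftFindR, hi, hc]
    · simp [ftFindRg, ftFindR, hi, hc,
        ih (fun p hp => h p (List.mem_cons_of_mem _ hp))]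

-- B's guarded scan over the full reversed enumerate equals A's scan over the reversed enumerate of [:-1].
theorem ftFindRg_enum (r : Int) (om : List (List Int)) :
    ftFindRg r (om.length : Int) (PySem.List.enumerate om 0).reverse
      = ftFindR r (PySem.List.enumerate om.dropLast 0).reverse := by
  induction om using List.reverseRecOn with
  | nil => rfl
  | append_singleton ys z _ =>
    rw [PySem.List.enumerate_append]
    have hlast : ¬ ((0 : Int) + ys.length < ((ys ++ [z]).length : Int) - 1 ∧
        r ≥ ftGet1 z) := by
      simp only [List.length_append, List.length_singleton]
      push_cast
      intro hc
      omega
    have hmem : ∀ p ∈ (PySem.List.enumerate ys 0).reverse,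
        p.1 < ((ys ++ [z]).length : Int) - 1 := by
      intro p hp
      rw [List.mem_reverse, PySem.List.mem_enumerate_iff] at hp
      obtain ⟨k, hk, rfl⟩ := hp
      simp only [List.length_append, List.length_singleton]
      push_cast
      omega
    simp only [PySem.List.enumerate_cons, PySem.List.enumerate_nil,
      List.reverse_append, List.reverse_cons, List.reverse_nil, List.nil_append,
      List.cons_append, List.dropLast_concat]
    rw [ftFindRg, if_neg hlast, ftFindRg_eq_ftFindR r _ _ hmem]

-- ===== VERDICT (by name: the statement is the Claim_ definition above) =====
theorem find_tokens_spec : Claim_equal_find_tokens := by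
  intro l r om _ _
  unfold Spec_find_tokens find_tokens find_tokens_alt
  dsimp only
  rw [ftFold_fst, ftFold_snd, ftFindRg_enum, PySem.List.slice_to_neg_one]
  simp
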